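-- pv_equiv track=rewrite | github.com/koomedkm/Aiken | script1.py | text_to_aiken
-- ===== SOURCE A (Python) =====
-- def text_to_aiken(text):
--     lines = text.split('\n')
--     questions = []
--     current_question = None
--
--     for line in lines:
--         line = line.strip()
--
--         if line.startswith('Q:'):
--             if current_question:
--                 questions.append(current_question)
--             current_question = {'question': line[2:], 'choices': []}
--         elif line.startswith('A:'):
--             if current_question:
--                 current_question['choices'].append(line[2:])
--
--     if current_question:
--         questions.append(current_question)
--
--     aiken_format = ""
--     for idx, question in enumerate(questions):
--         aiken_format += f"{idx + 1}. {question['question']}\n"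
--         for i, choice in enumerate(question['choices']):
--             aiken_format += f"   {'ABCDE'[i]}. {choice}\n"
--
--     return aiken_format
-- ===== SOURCE B (Python) =====
-- def text_to_aiken(text):
--     # single pass: parse and format simultaneously, no intermediate questions list
--     parts = []
--     qnum = 0
--     cidx = 0
--     for raw in text.split('\n'):
--         line = raw.strip()
--         if line.startswith('Q:'):
--             qnum += 1
--             cidx = 0
--             parts.append(f"{qnum}. {line[2:]}\n")
--         elif line.startswith('A:') and qnum > 0:
--             parts.append(f"   {'ABCDE'[cidx]}. {line[2:]}\n")
--             cidx += 1
--     return ''.join(parts)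
-- ===== Notes on version B (the rewrite author's own statement) =====
-- stated objective: alternative
-- what changed: Replaces A's two-phase design (first build a list of question dicts with a current-question holder, then a second enumerate-nested-enumerate pass formatting it) with one fused pass over the stripped lines that formats each line immediately using a question counter and a per-question choice index, joining the pieces at the end.
import Mathlib
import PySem

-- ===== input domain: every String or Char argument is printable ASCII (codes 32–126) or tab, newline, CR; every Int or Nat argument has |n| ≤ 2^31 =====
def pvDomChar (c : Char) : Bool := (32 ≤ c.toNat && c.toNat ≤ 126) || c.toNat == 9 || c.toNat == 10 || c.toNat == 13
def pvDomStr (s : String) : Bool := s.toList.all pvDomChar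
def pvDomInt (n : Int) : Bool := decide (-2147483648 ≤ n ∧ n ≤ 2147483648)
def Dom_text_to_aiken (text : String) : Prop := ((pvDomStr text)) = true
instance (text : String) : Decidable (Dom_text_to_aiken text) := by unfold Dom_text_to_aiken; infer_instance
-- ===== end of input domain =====

-- B fuses A's two phases (collect question records, then format with nested enumerate)
-- into one pass that formats each line as it is parsed; same output, same cost (objective: alternative).

-- ===== PORT A =====
-- one step of A's parsing loop; state = (questions, current_question)
def pvA_step (s : List (String × List String) × Option (String × List String)) (raw : String) :
    List (String × List String) × Option (String × List String) :=
  let line := PySem.Str.strip raw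
  if PySem.Str.startswith line "Q:" then
    ((match s.2 with | some c => s.1 ++ [c] | none => s.1),
     some (PySem.Str.slice line (some 2) none, ([] : List String)))
  else if PySem.Str.startswith line "A:" then
    (s.1, match s.2 with
          | some c => some (c.1, c.2 ++ [PySem.Str.slice line (some 2) none])
          | none => none)
  else s

-- f"   {'ABCDE'[i]}. {c}\n"; exact for 0 ≤ i < 5 (guaranteed by Pre_); Python raises IndexError otherwise
def pvA_choice (i : Int) (c : String) : String :=
  "   " ++ String.ofList [((PySem.Str.pyGet? "ABCDE" i).getD '?')] ++ ". " ++ c ++ "\n"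

-- f"{n + 1}. {q}\n"
def pvA_head (n : Int) (q : String) : String := PySem.Int.toStr (n + 1) ++ ". " ++ q ++ "\n"

def text_to_aiken (text : String) : String :=
  let lines := (PySem.Str.split? text "\n").getD []   -- separator "\n" ≠ "": never none
  let st := lines.foldl pvA_step ([], none)
  let questions := st.1 ++ (match st.2 with | some c => [c] | none => [])
  (PySem.List.enumerate questions).foldl (fun acc p =>
    (PySem.List.enumerate p.2.2).foldl (fun acc2 q => acc2 ++ pvA_choice q.1 q.2)
      (acc ++ pvA_head p.1 p.2.1)) ""

-- ===== PORT B =====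
-- one step of B's fused loop; state = (output pieces, question counter, choice index)
def pvB_step (s : List String × Int × Int) (raw : String) : List String × Int × Int :=
  let line := PySem.Str.strip raw
  if PySem.Str.startswith line "Q:" then
    (s.1 ++ [PySem.Int.toStr (s.2.1 + 1) ++ ". " ++ PySem.Str.slice line (some 2) none ++ "\n"],
     s.2.1 + 1, 0)
  else if PySem.Str.startswith line "A:" && decide (0 < s.2.1) then
    (s.1 ++ ["   " ++ String.ofList [((PySem.Str.pyGet? "ABCDE" s.2.2).getD '?')] ++ ". " ++
             PySem.Str.slice line (some 2) none ++ "\n"],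
     s.2.1, s.2.2 + 1)
  else s

def text_to_aiken_alt (text : String) : String :=
  PySem.Str.join "" (((PySem.Str.split? text "\n").getD []).foldl pvB_step ([], 0, 0)).1

-- ===== PRECONDITION & SPEC =====
-- Pre_ excludes exactly the inputs where some 'Q:' line is followed by more than five 'A:' lines
-- (before the next 'Q:' line): there the Python A raises IndexError on 'ABCDE'[i]; elsewhere A returns.
def Pre_text_to_aiken (text : String) : Prop :=
  ∀ g ∈ ((((PySem.Str.split? text "\n").getD []).map PySem.Str.strip).splitOnP
        (fun l => PySem.Str.startswith l "Q:")).tail,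
    g.countP (fun l => PySem.Str.startswith l "A:") ≤ 5
instance (text : String) : Decidable (Pre_text_to_aiken text) := by
  unfold Pre_text_to_aiken; infer_instance

def pvWitness_text_to_aiken : String := "Q: capital?\nA: Paris\nA: Rome"

def Spec_text_to_aiken (text : String) (out : String) : Prop := out = text_to_aiken_alt text
instance (text : String) (out : String) : Decidable (Spec_text_to_aiken text out) := by unfold Spec_text_to_aiken; infer_instance

-- ===== CLAIM (what is proved, stated in full; the proofs are below) =====
def Claim_equal_text_to_aiken : Prop := ∀ (text : String), Dom_text_to_aiken text → Pre_text_to_aiken text → Spec_text_to_aiken text (text_to_aiken text)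

-- ===== LEMMAS AND PROOFS =====

theorem pv_chars_join_nil (ps : List (List Char)) : PySem.Chars.join [] ps = ps.flatten := by
  induction ps with
  | nil => rfl
  | cons a t ih =>
    cases t with
    | nil => simp [PySem.Chars.join, List.intercalate]
    | cons b t' => simp_all [PySem.Chars.join_cons_cons]

theorem pv_join_append (l : List String) (x : String) :
    PySem.Str.join "" (l ++ [x]) = PySem.Str.join "" l ++ x := by
  apply String.toList_inj.mp
  simp [PySem.Str.toList_join, pv_chars_join_nil]

theorem pv_join_nil : PySem.Str.join "" ([] : List String) = "" := by
  apply String.toList_inj.mp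
  simp [PySem.Str.toList_join]

theorem pv_join_singleton (x : String) : PySem.Str.join "" [x] = x := by
  apply String.toList_inj.mp
  simp [PySem.Str.toList_join]

-- how A's formatting phase renders a choice list starting at index i
def pvRenderC (cs : List String) (i : Int) : String :=
  match cs with
  | [] => ""
  | c :: rest => pvA_choice i c ++ pvRenderC rest (i + 1)

-- how A's formatting phase renders a question list starting at index s
def pvRender (qs : List (String × List String)) (s : Int) : String :=
  match qs with
  | [] => ""
  | q :: rest => pvA_head s q.1 ++ pvRenderC q.2 0 ++ pvRender rest (s + 1)

theorem pvRenderC_append (cs : List String) (x : String) (i : Int) :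
    pvRenderC (cs ++ [x]) i = pvRenderC cs i ++ pvA_choice (i + cs.length) x := by
  induction cs generalizing i with
  | nil => simp [pvRenderC]
  | cons c rest ih =>
    simp only [List.cons_append, pvRenderC, ih, String.append_assoc, List.length_cons]
    push_cast
    ring_nf

theorem pvRender_append (qs : List (String × List String)) (q : String × List String) (s : Int) :
    pvRender (qs ++ [q]) s = pvRender qs s ++ (pvA_head (s + qs.length) q.1 ++ pvRenderC q.2 0) := by
  induction qs generalizing s with
  | nil => simp [pvRender]
  | cons a rest ih =>
    simp only [List.cons_append, pvRender, ih, String.append_assoc, List.length_cons]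
    push_cast
    ring_nf

theorem pvA_fmt_inner (cs : List String) (i : Int) (acc : String) :
    (PySem.List.enumerate cs i).foldl (fun acc2 q => acc2 ++ pvA_choice q.1 q.2) acc
      = acc ++ pvRenderC cs i := by
  induction cs generalizing i acc with
  | nil => simp [PySem.List.enumerate_nil, pvRenderC]
  | cons c rest ih =>
    simp only [PySem.List.enumerate_cons, List.foldl_cons, ih, pvRenderC, String.append_assoc]

theorem pvA_fmt (qs : List (String × List String)) (s : Int) (acc : String) :
    (PySem.List.enumerate qs s).foldl (fun acc p =>
      (PySem.List.enumerate p.2.2).foldl (fun acc2 q => acc2 ++ pvA_choice q.1 q.2)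
        (acc ++ pvA_head p.1 p.2.1)) acc
      = acc ++ pvRender qs s := by
  induction qs generalizing s acc with
  | nil => simp [PySem.List.enumerate_nil, pvRender]
  | cons q rest ih =>
    simp only [PySem.List.enumerate_cons, List.foldl_cons]
    rw [pvA_fmt_inner, ih]
    simp [pvRender, String.append_assoc]

-- the invariant tying A's parse state to B's fused state
def pvInv (a : List (String × List String) × Option (String × List String))
    (b : List String × Int × Int) : Prop :=
  match a.2 with
  | none => a.1 = [] ∧ b = ([], 0, 0)
  | some c =>
      b.2.1 = (a.1.length : Int) + 1 ∧ b.2.2 = (c.2.length : Int) ∧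
      PySem.Str.join "" b.1 =
        pvRender a.1 0 ++ (pvA_head (a.1.length : Int) c.1 ++ pvRenderC c.2 0)

-- shape of one A-step / B-step under each guard outcome
theorem pvA_step_q (s : List (String × List String) × Option (String × List String))
    (raw : String) (hq : PySem.Str.startswith (PySem.Str.strip raw) "Q:" = true) :
    pvA_step s raw = ((match s.2 with | some c => s.1 ++ [c] | none => s.1),
      some (PySem.Str.slice (PySem.Str.strip raw) (some 2), ([] : List String))) := by
  simp only [pvA_step, hq, if_true]

theorem pvB_step_q (s : List String × Int × Int)
    (raw : String) (hq : PySem.Str.startswith (PySem.Str.strip raw) "Q:" = true) :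
    pvB_step s raw = (s.1 ++ [PySem.Int.toStr (s.2.1 + 1) ++ ". " ++
      PySem.Str.slice (PySem.Str.strip raw) (some 2) ++ "\n"], s.2.1 + 1, 0) := by
  simp only [pvB_step, hq, if_true]

theorem pvA_step_a (s : List (String × List String) × Option (String × List String))
    (raw : String) (hq : PySem.Str.startswith (PySem.Str.strip raw) "Q:" = false)
    (ha : PySem.Str.startswith (PySem.Str.strip raw) "A:" = true) :
    pvA_step s raw = (s.1, match s.2 with
      | some c => some (c.1, c.2 ++ [PySem.Str.slice (PySem.Str.strip raw) (some 2)])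
      | none => none) := by
  simp only [pvA_step, hq, ha, Bool.false_eq_true, if_false, if_true]

theorem pvB_step_a_pos (s : List String × Int × Int)
    (raw : String) (hq : PySem.Str.startswith (PySem.Str.strip raw) "Q:" = false)
    (ha : PySem.Str.startswith (PySem.Str.strip raw) "A:" = true)
    (hpos : (0 : Int) < s.2.1) :
    pvB_step s raw = (s.1 ++ ["   " ++ String.ofList [((PySem.Str.pyGet? "ABCDE" s.2.2).getD '?')] ++
      ". " ++ PySem.Str.slice (PySem.Str.strip raw) (some 2) ++ "\n"], s.2.1, s.2.2 + 1) := by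
  simp only [pvB_step, hq, ha, Bool.false_eq_true, if_false, Bool.true_and,
    decide_eq_true hpos, if_true]

theorem pvB_step_a_zero (s : List String × Int × Int)
    (raw : String) (hq : PySem.Str.startswith (PySem.Str.strip raw) "Q:" = false)
    (ha : PySem.Str.startswith (PySem.Str.strip raw) "A:" = true)
    (hz : s.2.1 = 0) :
    pvB_step s raw = s := by
  simp only [pvB_step, hq, ha, hz, Bool.false_eq_true, if_false, Bool.true_and]
  norm_num

theorem pvA_step_o (s : List (String × List String) × Option (String × List String))
    (raw : String) (hq : PySem.Str.startswith (PySem.Str.strip raw) "Q:" = false)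
    (ha : PySem.Str.startswith (PySem.Str.strip raw) "A:" = false) :
    pvA_step s raw = s := by
  simp only [pvA_step, hq, ha, Bool.false_eq_true, if_false]

theorem pvB_step_o (s : List String × Int × Int)
    (raw : String) (hq : PySem.Str.startswith (PySem.Str.strip raw) "Q:" = false)
    (ha : PySem.Str.startswith (PySem.Str.strip raw) "A:" = false) :
    pvB_step s raw = s := by
  simp only [pvB_step, hq, ha, Bool.false_eq_true, if_false, Bool.false_and]

theorem pv_step_inv (qs : List (String × List String)) (cur : Option (String × List String))
    (out : List String) (qn ci : Int) (raw : String)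
    (h : pvInv (qs, cur) (out, qn, ci)) :
    pvInv (pvA_step (qs, cur) raw) (pvB_step (out, qn, ci) raw) := by
  cases hq : PySem.Str.startswith (PySem.Str.strip raw) "Q:" with
  | true =>
    rw [pvA_step_q _ raw hq, pvB_step_q _ raw hq]
    cases cur with
    | none =>
      obtain ⟨hqs, hb⟩ := h
      simp only at hqs hb
      subst hqs
      rw [Prod.ext_iff, Prod.ext_iff] at hb
      obtain ⟨rfl, rfl, rfl⟩ : out = [] ∧ qn = 0 ∧ ci = 0 := ⟨hb.1, hb.2.1, hb.2.2⟩
      refine ⟨by norm_num, by simp, ?_⟩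
      rw [List.nil_append, pv_join_singleton]
      simp [pvRender, pvRenderC, pvA_head]
    | some c =>
      obtain ⟨h1, h2, h3⟩ := h
      simp only at h1 h2 h3
      subst h1 h2
      refine ⟨?_, by simp, ?_⟩
      · simp only [List.length_append, List.length_cons, List.length_nil]
        omega
      · rw [pv_join_append, h3, pvRender_append]
        simp only [pvRenderC, pvA_head, String.append_assoc, zero_add,
          List.length_append, List.length_cons, List.length_nil]
        push_cast
        simp
  | false =>
    cases ha : PySem.Str.startswith (PySem.Str.strip raw) "A:" with
    | true =>
      cases cur with
      | none =>
        obtain ⟨hqs, hb⟩ := h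
        simp only at hqs hb
        subst hqs
        rw [Prod.ext_iff, Prod.ext_iff] at hb
        obtain ⟨rfl, rfl, rfl⟩ : out = [] ∧ qn = 0 ∧ ci = 0 := ⟨hb.1, hb.2.1, hb.2.2⟩
        rw [pvA_step_a _ raw hq ha, pvB_step_a_zero _ raw hq ha rfl]
        exact ⟨rfl, rfl⟩
      | some c =>
        obtain ⟨h1, h2, h3⟩ := h
        simp only at h1 h2 h3
        subst h1 h2
        rw [pvA_step_a _ raw hq ha,
          pvB_step_a_pos _ raw hq ha (by simp only []; positivity)]
        refine ⟨by simp, ?_, ?_⟩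
        · simp only [List.length_append, List.length_cons, List.length_nil]
          omega
        · rw [pv_join_append, h3]
          simp only [pvRenderC_append, zero_add, String.append_assoc, pvA_choice]
    | false =>
      rw [pvA_step_o _ raw hq ha, pvB_step_o _ raw hq ha]
      exact h

theorem pv_fold_inv (ls : List String)
    (a : List (String × List String) × Option (String × List String))
    (b : List String × Int × Int) (h : pvInv a b) :
    pvInv (ls.foldl pvA_step a) (ls.foldl pvB_step b) := by
  induction ls generalizing a b with
  | nil => exact h
  | cons l rest ih =>
    obtain ⟨qs, cur⟩ := a
    obtain ⟨out, qn, ci⟩ := b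
    simp only [List.foldl_cons]
    exact ih _ _ (pv_step_inv qs cur out qn ci l h)

theorem pv_main (ls : List String) :
    (PySem.List.enumerate ((ls.foldl pvA_step ([], none)).1 ++
        (match (ls.foldl pvA_step ([], none)).2 with | some c => [c] | none => []))).foldl
      (fun acc p =>
        (PySem.List.enumerate p.2.2).foldl (fun acc2 q => acc2 ++ pvA_choice q.1 q.2)
          (acc ++ pvA_head p.1 p.2.1)) ""
      = PySem.Str.join "" ((ls.foldl pvB_step ([], 0, 0))).1 := by
  have hinv := pv_fold_inv ls ([], none) ([], 0, 0) ⟨rfl, rfl⟩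
  rcases hA : ls.foldl pvA_step ([], none) with ⟨qs, cur⟩
  rcases hB : ls.foldl pvB_step ([], 0, 0) with ⟨out, qn, ci⟩
  rw [hA, hB] at hinv
  dsimp only
  cases cur with
  | none =>
    obtain ⟨hqs, hb⟩ := hinv
    simp only at hqs hb
    subst hqs
    rw [Prod.ext_iff, Prod.ext_iff] at hb
    obtain ⟨rfl, -, -⟩ : out = [] ∧ qn = 0 ∧ ci = 0 := ⟨hb.1, hb.2.1, hb.2.2⟩
    simp [PySem.List.enumerate_nil, pv_join_nil]
  | some c =>
    obtain ⟨h1, h2, h3⟩ := hinv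
    simp only at h1 h2 h3
    rw [pvA_fmt, pvRender_append]
    simp only [zero_add]
    rw [← h3]
    simp

theorem pv_equal (text : String) : text_to_aiken text = text_to_aiken_alt text := by
  unfold text_to_aiken text_to_aiken_alt
  exact pv_main _

-- ===== VERDICT (by name: the statement is the Claim_ definition above) =====
theorem text_to_aiken_spec : Claim_equal_text_to_aiken := by
  intro text _ _
  unfold Spec_text_to_aiken
  exact pv_equal text
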